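-- pv_equiv track=rewrite | github.com/h2oai/h2o-3 | h2o-bindings/bin/gen_python.py | gen_models_docs
-- ===== SOURCE A (Python) =====
-- def gen_models_docs(modules):
--     yield ".. This file is autogenerated from gen_python.py, DO NOT MODIFY"
--     yield ":tocdepth: 3"
--     yield ""
--     yield "Modeling In H2O"
--     yield "==============="
--     for cat in ["Supervised", "Unsupervised", "Miscellaneous"]:
--         yield ""
--         yield cat
--         yield "+" * len(cat)
--         yield ""
--         for module, clz, category in sorted(modules):
--             if category != cat: continue
--             fullmodule = "h2o.estimators.%s.%s" % (module, clz)
--             if clz == "H2OGridSearch":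
--                 fullmodule = "h2o.grid.grid_search.H2OGridSearch"
--             if clz == "H2OAutoML":
--                 fullmodule = "h2o.automl.autoh2o.H2OAutoML"
--             yield ":mod:`%s`" % clz
--             yield "-" * (7 + len(clz))
--             yield ".. autoclass:: %s" % fullmodule
--             yield "    :show-inheritance:"
--             yield "    :members:"
--             yield ""
-- ===== SOURCE B (Python) =====
-- def gen_models_docs(modules):
--     # Single sort + one grouping pass into per-category buckets, then one
--     # emission pass over the fixed category order (A rescans sorted(modules)
--     # once per category).
--     buckets = {"Supervised": [], "Unsupervised": [], "Miscellaneous": []}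
--     for module, clz, category in sorted(modules):
--         bucket = buckets.get(category)
--         if bucket is None:
--             continue
--         if clz == "H2OGridSearch":
--             fullmodule = "h2o.grid.grid_search.H2OGridSearch"
--         elif clz == "H2OAutoML":
--             fullmodule = "h2o.automl.autoh2o.H2OAutoML"
--         else:
--             fullmodule = "h2o.estimators.%s.%s" % (module, clz)
--         bucket.extend([
--             ":mod:`%s`" % clz,
--             "-" * (7 + len(clz)),
--             ".. autoclass:: %s" % fullmodule,
--             "    :show-inheritance:",
--             "    :members:",
--             "",
--         ])
--     lines = [
--         ".. This file is autogenerated from gen_python.py, DO NOT MODIFY",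
--         ":tocdepth: 3",
--         "",
--         "Modeling In H2O",
--         "===============",
--     ]
--     for cat in ("Supervised", "Unsupervised", "Miscellaneous"):
--         lines += ["", cat, "+" * len(cat), ""]
--         lines += buckets[cat]
--     yield from lines
-- ===== Notes on version B (the rewrite author's own statement) =====
-- stated objective: alternative
-- what changed: B sorts the modules once and groups them into per-category buckets in a single pass over the sorted list, then emits the fixed category order from the buckets, instead of A's re-sorting and rescanning the whole module list once per category.
import Mathlib
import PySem

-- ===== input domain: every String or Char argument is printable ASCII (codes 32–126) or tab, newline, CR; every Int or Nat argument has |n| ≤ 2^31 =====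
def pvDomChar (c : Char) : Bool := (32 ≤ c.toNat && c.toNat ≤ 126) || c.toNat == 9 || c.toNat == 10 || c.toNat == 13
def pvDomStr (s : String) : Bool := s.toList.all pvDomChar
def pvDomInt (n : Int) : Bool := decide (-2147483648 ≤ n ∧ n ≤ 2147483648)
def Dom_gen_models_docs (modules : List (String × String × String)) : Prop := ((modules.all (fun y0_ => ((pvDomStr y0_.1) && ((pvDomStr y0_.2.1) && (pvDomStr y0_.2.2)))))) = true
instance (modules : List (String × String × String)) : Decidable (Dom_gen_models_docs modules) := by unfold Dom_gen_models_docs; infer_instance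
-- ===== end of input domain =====

-- B builds the per-category blocks in ONE pass over the sorted list (a dict of buckets),
-- where A rescans the whole sorted list once per category; objective: alternative/simpler traversal.

-- shared helpers (both Pythons call sorted(modules) and '*' on strings)
-- "x" * n (ASCII-exact: a string literal repeated n times)
def strRepeat (c : Char) (n : Nat) : String := String.ofList (List.replicate n c)

-- Python's lexicographic '<' on 3-tuples of strings (exact on ASCII: Lean's String '<' is code-point lexicographic)
def tupLt (a b : String × String × String) : Bool :=
  decide (a.1 < b.1) || (a.1 == b.1 && (decide (a.2.1 < b.2.1) || (a.2.1 == b.2.1 && decide (a.2.2 < b.2.2))))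

-- sorted(modules): stable insertion sort, hand-ported because the tuple key is lexicographic
-- (same shape as PySem.List.sorted_eq_foldl_insertBy)
def pySorted3 (xs : List (String × String × String)) : List (String × String × String) :=
  xs.foldl (fun acc x => PySem.List.insertBy (fun a b => tupLt a b) x acc) []

-- ===== PORT A =====
def gen_models_docs (modules : List (String × String × String)) : List String :=
  let out : List String := [".. This file is autogenerated from gen_python.py, DO NOT MODIFY",
    ":tocdepth: 3", "", "Modeling In H2O", "==============="]
  ["Supervised", "Unsupervised", "Miscellaneous"].foldl (fun out cat =>
    let out := out ++ ["", cat, strRepeat '+' cat.toList.length, ""]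
    (pySorted3 modules).foldl (fun out m =>
      if m.2.2 ≠ cat then out
      else
        let fullmodule := "h2o.estimators." ++ m.1 ++ "." ++ m.2.1
        let fullmodule := if m.2.1 = "H2OGridSearch" then "h2o.grid.grid_search.H2OGridSearch" else fullmodule
        let fullmodule := if m.2.1 = "H2OAutoML" then "h2o.automl.autoh2o.H2OAutoML" else fullmodule
        out ++ [":mod:`" ++ m.2.1 ++ "`", strRepeat '-' (7 + m.2.1.toList.length),
                ".. autoclass:: " ++ fullmodule, "    :show-inheritance:", "    :members:", ""]) out) out

-- ===== PORT B =====
def entryLines (m : String × String × String) : List String :=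
  let fullmodule :=
    if m.2.1 = "H2OGridSearch" then "h2o.grid.grid_search.H2OGridSearch"
    else if m.2.1 = "H2OAutoML" then "h2o.automl.autoh2o.H2OAutoML"
    else "h2o.estimators." ++ m.1 ++ "." ++ m.2.1
  [":mod:`" ++ m.2.1 ++ "`", strRepeat '-' (7 + m.2.1.toList.length),
   ".. autoclass:: " ++ fullmodule, "    :show-inheritance:", "    :members:", ""]

def gen_models_docs_alt (modules : List (String × String × String)) : List String :=
  let buckets := (pySorted3 modules).foldl
    (fun (d : PySem.Dict String (List String)) m =>
      match d.get? m.2.2 with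
      | none => d
      | some _ => d.modify m.2.2 [] (fun b => b ++ entryLines m))
    (PySem.Dict.ofList [("Supervised", []), ("Unsupervised", []), ("Miscellaneous", [])])
  let lines : List String := [".. This file is autogenerated from gen_python.py, DO NOT MODIFY",
    ":tocdepth: 3", "", "Modeling In H2O", "==============="]
  ["Supervised", "Unsupervised", "Miscellaneous"].foldl (fun lines cat =>
    lines ++ ["", cat, strRepeat '+' cat.toList.length, ""] ++ buckets.getD cat []) lines

-- ===== PRECONDITION & SPEC =====
def Spec_gen_models_docs (modules : List (String × String × String)) (out : List String) : Prop := out = gen_models_docs_alt modules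
instance (modules : List (String × String × String)) (out : List String) : Decidable (Spec_gen_models_docs modules out) := by unfold Spec_gen_models_docs; infer_instance

-- ===== CLAIM (what is proved, stated in full; the proofs are below) =====
def Claim_equal_gen_models_docs : Prop := ∀ (modules : List (String × String × String)), Dom_gen_models_docs modules → Spec_gen_models_docs modules (gen_models_docs modules)

-- ===== LEMMAS AND PROOFS =====

-- guarded append loop = filter + flatMap
theorem foldl_if_append_flatMap {α β : Type} (p : α → Bool) (g : α → List β)
    (l : List α) (acc : List β) :
    l.foldl (fun acc x => if p x then acc ++ g x else acc) acc
      = acc ++ (l.filter p).flatMap g := by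
  induction l generalizing acc with
  | nil => simp
  | cons x l ih =>
    by_cases h : p x <;> simp [List.foldl_cons, h, ih, List.append_assoc]

-- A's inline block (reached only when m.2.2 = cat) produces exactly entryLines m
theorem aLines_eq_entryLines (m : String × String × String) :
    (let fullmodule := "h2o.estimators." ++ m.1 ++ "." ++ m.2.1
     let fullmodule := if m.2.1 = "H2OGridSearch" then "h2o.grid.grid_search.H2OGridSearch" else fullmodule
     let fullmodule := if m.2.1 = "H2OAutoML" then "h2o.automl.autoh2o.H2OAutoML" else fullmodule
     [":mod:`" ++ m.2.1 ++ "`", strRepeat '-' (7 + m.2.1.toList.length),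
      ".. autoclass:: " ++ fullmodule, "    :show-inheritance:", "    :members:", ""]) = entryLines m := by
  simp only [entryLines]
  by_cases h1 : m.2.1 = "H2OGridSearch"
  · by_cases h2 : m.2.1 = "H2OAutoML"
    · rw [h1] at h2; exact absurd h2 (by decide)
    · simp [h1]
  · by_cases h2 : m.2.1 = "H2OAutoML" <;> simp [h1, h2]

-- A's inner rescan of category cat appends the entry lines of exactly the cat-entries, in order
theorem a_inner_eq (cat : String) (s : List (String × String × String)) (acc : List String) :
    s.foldl (fun out m =>
      if m.2.2 ≠ cat then out
      else
        let fullmodule := "h2o.estimators." ++ m.1 ++ "." ++ m.2.1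
        let fullmodule := if m.2.1 = "H2OGridSearch" then "h2o.grid.grid_search.H2OGridSearch" else fullmodule
        let fullmodule := if m.2.1 = "H2OAutoML" then "h2o.automl.autoh2o.H2OAutoML" else fullmodule
        out ++ [":mod:`" ++ m.2.1 ++ "`", strRepeat '-' (7 + m.2.1.toList.length),
                ".. autoclass:: " ++ fullmodule, "    :show-inheritance:", "    :members:", ""]) acc
      = acc ++ (s.filter (fun m => m.2.2 == cat)).flatMap entryLines := by
  have hfun : (fun (out : List String) (m : String × String × String) =>
      if m.2.2 ≠ cat then out
      else
        let fullmodule := "h2o.estimators." ++ m.1 ++ "." ++ m.2.1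
        let fullmodule := if m.2.1 = "H2OGridSearch" then "h2o.grid.grid_search.H2OGridSearch" else fullmodule
        let fullmodule := if m.2.1 = "H2OAutoML" then "h2o.automl.autoh2o.H2OAutoML" else fullmodule
        out ++ [":mod:`" ++ m.2.1 ++ "`", strRepeat '-' (7 + m.2.1.toList.length),
                ".. autoclass:: " ++ fullmodule, "    :show-inheritance:", "    :members:", ""])
      = fun out m => if (fun m => m.2.2 == cat) m then out ++ entryLines m else out := by
    funext out m
    by_cases h : m.2.2 = cat
    · simp only [h, ne_eq, not_true_eq_false, if_false, beq_self_eq_true, if_true]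
      rw [← aLines_eq_entryLines]
    · simp [h]
  rw [hfun, foldl_if_append_flatMap]

-- B's grouping pass: the bucket of a key present in d collects exactly its entries, in order
theorem b_bucket_eq (cat : String) (s : List (String × String × String))
    (d : PySem.Dict String (List String)) (hc : (d.get? cat).isSome) :
    ((s.foldl (fun (d : PySem.Dict String (List String)) m =>
        match d.get? m.2.2 with
        | none => d
        | some _ => d.modify m.2.2 [] (fun b => b ++ entryLines m)) d).getD cat [])
      = d.getD cat [] ++ (s.filter (fun m => m.2.2 == cat)).flatMap entryLines := by
  induction s generalizing d with
  | nil => simp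
  | cons m s ih =>
    simp only [List.foldl_cons, List.filter_cons]
    cases hd : d.get? m.2.2 with
    | none =>
      rw [ih d hc]
      have hne : ¬ (m.2.2 = cat) := by
        intro h; rw [h] at hd; simp [hd] at hc
      simp [hne]
    | some b =>
      have hc' : ((d.modify m.2.2 [] (fun b => b ++ entryLines m)).get? cat).isSome := by
        rw [← PySem.Dict.contains_eq_isSome_get?] at hc ⊢
        rw [PySem.Dict.contains_modify]
        simp [hc]
      rw [ih _ hc', PySem.Dict.getD_modify]
      by_cases h : m.2.2 = cat
      · simp [h, List.flatMap_cons, List.append_assoc]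
      · have h' : ¬ (cat = m.2.2) := fun hh => h hh.symm
        simp [h, h']

-- ===== VERDICT (by name: the statement is the Claim_ definition above) =====
theorem gen_models_docs_spec : Claim_equal_gen_models_docs := by
  intro modules _
  unfold Spec_gen_models_docs gen_models_docs gen_models_docs_alt
  simp only [List.foldl_cons, List.foldl_nil]
  rw [a_inner_eq, a_inner_eq, a_inner_eq,
      b_bucket_eq _ _ _ (by decide), b_bucket_eq _ _ _ (by decide), b_bucket_eq _ _ _ (by decide),
      show (PySem.Dict.ofList [("Supervised", ([] : List String)), ("Unsupervised", []), ("Miscellaneous", [])]).getD "Supervised" [] = [] from rfl,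
      show (PySem.Dict.ofList [("Supervised", ([] : List String)), ("Unsupervised", []), ("Miscellaneous", [])]).getD "Unsupervised" [] = [] from rfl,
      show (PySem.Dict.ofList [("Supervised", ([] : List String)), ("Unsupervised", []), ("Miscellaneous", [])]).getD "Miscellaneous" [] = [] from rfl]
  simp [List.append_assoc]
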